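-- pv_equiv track=rewrite | github.com/Loxenary/Tucil1_13522157 | src/CombinationGenerator.py | get_all_possible_next_tokens
-- ===== SOURCE A (Python) =====
-- def get_all_possible_next_tokens(sequences):
--     # return a dictionary that exist of unique token as its key and the possible next_token of the unique token as the value
--
--     def find_all_next_token(sequences, token): # find all next possible token of current token (only one token)
--         next_token = []
--
--         def idx_decider(sequence, idx):
--             if(idx == (len(sequence)-1) and sequence[0] not in next_token):
--                 next_token.append(sequence[0])
--             elif(idx < (len(sequence) -1) and sequence[idx+1] not in next_token):
--                 next_token.append(sequence[idx + 1])
--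
--         for sequence in sequences:
--             for i, curr_token in enumerate(sequence):
--                 if(curr_token == token):
--                     idx_decider(sequence,i)
--         return next_token
--
--     def get_all_unique_token(sequences):
--         unique_token = []
--         for sequence in sequences:
--             for token in sequence:
--                 if(token not in unique_token):
--                     unique_token.append(token)
--         return unique_token
--
--     all_possible_next_tokens = {}
--     unique_tokens = get_all_unique_token(sequences)
--     for token in unique_tokens:
--         next_tokens = find_all_next_token(sequences, token)
--         all_possible_next_tokens[token] = next_tokens
--     return all_possible_next_tokens
-- ===== SOURCE B (Python) =====
-- def get_all_possible_next_tokens(sequences):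
--     result = {}
--     for seq in sequences:
--         for a, b in zip(seq, seq[1:] + seq[:1]):
--             nexts = result.setdefault(a, [])
--             if b not in nexts:
--                 nexts.append(b)
--     return result
-- ===== Notes on version B (the rewrite author's own statement) =====
-- stated objective: faster
-- what changed: Instead of collecting unique tokens first and then re-scanning all sequences once per token, B makes a single pass over the sequences, pairing each token with its successor (wrapping last to first via seq[1:]+seq[:1]) and appending it to a dict entry with order-preserving dedup.
import Mathlib
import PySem

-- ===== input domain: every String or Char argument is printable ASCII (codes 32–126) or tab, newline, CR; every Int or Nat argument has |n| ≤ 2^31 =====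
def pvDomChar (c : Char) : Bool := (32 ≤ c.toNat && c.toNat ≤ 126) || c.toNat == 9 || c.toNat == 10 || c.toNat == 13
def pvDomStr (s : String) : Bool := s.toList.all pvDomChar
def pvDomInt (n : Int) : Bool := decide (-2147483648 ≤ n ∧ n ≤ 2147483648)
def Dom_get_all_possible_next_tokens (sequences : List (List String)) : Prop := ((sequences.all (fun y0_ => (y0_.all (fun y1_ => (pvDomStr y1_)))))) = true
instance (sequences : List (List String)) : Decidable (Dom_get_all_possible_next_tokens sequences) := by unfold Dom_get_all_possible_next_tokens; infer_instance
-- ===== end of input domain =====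

-- B replaces A's per-unique-token rescans of all sequences by one pass over adjacent-pair
-- rotations, building the next-token dict directly (simpler, single traversal).

-- ===== PORT A =====
-- idx_decider: Python's 'if c1 and m1: … elif c2 and m2: …' — when c1 holds but m1 fails,
-- the elif's c2 (idx < len-1) is false, so the nested-if form below is exact.
def pvIdxDecider (sequence : List String) (idx : Int) (next_token : List String) : List String :=
  if idx = (sequence.length : Int) - 1 then
    (match PySem.List.pyGet? sequence 0 with
     | some t0 => if t0 ∉ next_token then next_token ++ [t0] else next_token
     | none => next_token)   -- unreachable: idx comes from enumerate, so sequence ≠ []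
  else if idx < (sequence.length : Int) - 1 then
    (match PySem.List.pyGet? sequence (idx + 1) with
     | some tn => if tn ∉ next_token then next_token ++ [tn] else next_token
     | none => next_token)   -- unreachable: idx + 1 < len
  else next_token

def pvFindAllNextToken (sequences : List (List String)) (token : String) : List String :=
  sequences.foldl
    (fun next_token sequence =>
      (PySem.List.enumerate sequence).foldl
        (fun next_token p => if p.2 = token then pvIdxDecider sequence p.1 next_token else next_token)
        next_token)
    []

def pvGetAllUniqueToken (sequences : List (List String)) : List String :=
  sequences.foldl
    (fun unique_token sequence =>
      sequence.foldl
        (fun unique_token token =>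
          if token ∉ unique_token then unique_token ++ [token] else unique_token)
        unique_token)
    []

def get_all_possible_next_tokens (sequences : List (List String)) : List (String × List String) :=
  ((pvGetAllUniqueToken sequences).foldl
      (fun d token => d.insert token (pvFindAllNextToken sequences token))
      (PySem.Dict.empty : PySem.Dict String (List String))).items

-- ===== PORT B =====
def pvRotPairs (seq : List String) : List (String × String) :=
  seq.zip (PySem.List.slice seq (some 1) none ++ PySem.List.slice seq none (some 1))

def pvBStep (d : PySem.Dict String (List String)) (p : String × String) :
    PySem.Dict String (List String) :=
  let d1 := d.setdefault p.1 []
  let nexts := d1.getD p.1 []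
  if p.2 ∉ nexts then d1.insert p.1 (nexts ++ [p.2]) else d1

def get_all_possible_next_tokens_alt (sequences : List (List String)) : List (String × List String) :=
  (sequences.foldl (fun d seq => (pvRotPairs seq).foldl pvBStep d)
      (PySem.Dict.empty : PySem.Dict String (List String))).items

-- ===== PRECONDITION & SPEC =====
def Spec_get_all_possible_next_tokens (sequences : List (List String)) (out : List (String × List String)) : Prop := out = get_all_possible_next_tokens_alt sequences
instance (sequences : List (List String)) (out : List (String × List String)) : Decidable (Spec_get_all_possible_next_tokens sequences out) := by unfold Spec_get_all_possible_next_tokens; infer_instance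

-- ===== CLAIM (what is proved, stated in full; the proofs are below) =====
def Claim_equal_get_all_possible_next_tokens : Prop := ∀ (sequences : List (List String)), Dom_get_all_possible_next_tokens sequences → Spec_get_all_possible_next_tokens sequences (get_all_possible_next_tokens sequences)

-- ===== LEMMAS AND PROOFS =====

-- The common model: the stream of rotation pairs of all sequences, and the ordered
-- dedup of the successors of t in that stream.
def pvPairs (sequences : List (List String)) : List (String × String) :=
  sequences.flatMap pvRotPairs

def pvCollect (qs : List (String × String)) (t : String) : List String :=
  qs.foldl (fun acc p => if p.1 = t then (if p.2 ∉ acc then acc ++ [p.2] else acc) else acc) []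

def pvModel (qs : List (String × String)) : PySem.Dict String (List String) :=
  PySem.Dict.mk ((PySem.List.dedup (qs.map Prod.fst)).map (fun t => (t, pvCollect qs t)))

lemma pvRotPairs_eq (seq : List String) :
    pvRotPairs seq = seq.zip (seq.drop 1 ++ seq.take 1) := by
  simp [pvRotPairs, PySem.List.slice_from_one, PySem.List.slice_to (xs := seq) (b := 1) (by omega),
    List.drop_one]

lemma length_rot (seq : List String) : (seq.drop 1 ++ seq.take 1).length = seq.length := by
  cases seq <;> simp

lemma map_fst_rotPairs (seq : List String) : (pvRotPairs seq).map Prod.fst = seq := by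
  rw [pvRotPairs_eq]
  exact List.map_fst_zip (by rw [length_rot])

lemma map_fst_pvPairs (sequences : List (List String)) :
    (pvPairs sequences).map Prod.fst = sequences.flatten := by
  simp [pvPairs, List.map_flatMap, map_fst_rotPairs, List.flatMap_id']

-- generic: two folds over index-parallel lists with pointwise-equal steps agree
lemma pvFoldlParallel {α β γ : Type} (f : γ → α → γ) (g : γ → β → γ) :
    ∀ (xs : List α) (ys : List β) (a : γ), xs.length = ys.length →
    (∀ i (h1 : i < xs.length) (h2 : i < ys.length) (acc : γ), f acc xs[i] = g acc ys[i]) →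
    xs.foldl f a = ys.foldl g a := by
  intro xs
  induction xs with
  | nil => intro ys a hlen _; cases ys <;> simp_all
  | cons x xs ih =>
    intro ys a hlen hpt
    cases ys with
    | nil => simp at hlen
    | cons y ys =>
      simp only [List.foldl_cons]
      have h0 := hpt 0 (by simp) (by simp) a
      simp at h0
      rw [h0]
      exact ih ys _ (by simpa using hlen)
        (fun i h1 h2 acc => by simpa using hpt (i + 1) (by simpa using h1) (by simpa using h2) acc)

lemma pvIdxDecider_eq (seq : List String) (i : Nat) (h : i < seq.length) (acc : List String) :
    pvIdxDecider seq (i : Int) acc =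
      (if (seq.drop 1 ++ seq.take 1)[i]'(by rw [length_rot]; exact h) ∉ acc
       then acc ++ [(seq.drop 1 ++ seq.take 1)[i]'(by rw [length_rot]; exact h)] else acc) := by
  unfold pvIdxDecider
  by_cases hl : i = seq.length - 1
  · have hc : (i : Int) = (seq.length : Int) - 1 := by omega
    have h0 : 0 < seq.length := by omega
    have hget : PySem.List.pyGet? seq 0 = some (seq[0]'h0) := by
      simpa using PySem.List.pyGet?_ofNat (xs := seq) (n := 0) h0
    have hd : (seq.drop 1).length = seq.length - 1 := by simp
    have hb : (seq.drop 1 ++ seq.take 1)[i]'(by rw [length_rot]; exact h) = seq[0]'h0 := by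
      rw [List.getElem_append_right (by omega)]
      simp [hl]
    rw [if_pos hc, hget, hb]
  · have hc : ¬ (i : Int) = (seq.length : Int) - 1 := by omega
    have hc2 : (i : Int) < (seq.length : Int) - 1 := by omega
    have hi1 : i + 1 < seq.length := by omega
    have hget : PySem.List.pyGet? seq ((i : Int) + 1) = some (seq[i + 1]'hi1) := by
      have : ((i : Int) + 1) = ((i + 1 : Nat) : Int) := by push_cast; ring
      rw [this]
      simpa using PySem.List.pyGet?_ofNat (xs := seq) (n := i + 1) hi1
    have hb : (seq.drop 1 ++ seq.take 1)[i]'(by rw [length_rot]; exact h) = seq[i + 1]'hi1 := by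
      rw [List.getElem_append_left (by simp; omega)]
      simp
    rw [if_neg hc, if_pos hc2, hget, hb]

lemma pvEnumFold_eq (seq : List String) (token : String) (acc : List String) :
    (PySem.List.enumerate seq).foldl
      (fun nt p => if p.2 = token then pvIdxDecider seq p.1 nt else nt) acc =
    (pvRotPairs seq).foldl
      (fun nt p => if p.1 = token then (if p.2 ∉ nt then nt ++ [p.2] else nt) else nt) acc := by
  rw [pvRotPairs_eq]
  apply pvFoldlParallel
  · rw [PySem.List.length_enumerate, List.length_zip, length_rot, Nat.min_self]
  · intro i h1 h2 nt
    have hi : i < seq.length := by simpa [PySem.List.length_enumerate] using h1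
    rw [PySem.List.getElem_enumerate seq 0 i h1, List.getElem_zip]
    simp only [zero_add]
    by_cases ht : seq[i] = token
    · rw [if_pos ht, if_pos ht, pvIdxDecider_eq seq i hi nt]
    · rw [if_neg ht, if_neg ht]

lemma pvFindAll_eq (sequences : List (List String)) (t : String) :
    pvFindAllNextToken sequences t = pvCollect (pvPairs sequences) t := by
  unfold pvFindAllNextToken pvCollect pvPairs
  rw [List.flatMap_def, List.foldl_flatten, List.foldl_map]
  exact PySem.List.foldl_congr_mem _ _ _ _ (fun acc seq _ => pvEnumFold_eq seq t acc)

lemma pvUnique_eq (sequences : List (List String)) :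
    pvGetAllUniqueToken sequences = PySem.List.dedup ((pvPairs sequences).map Prod.fst) := by
  rw [map_fst_pvPairs]
  unfold pvGetAllUniqueToken
  rw [PySem.List.dedup, PySem.Set.ofList, List.foldl_flatten]
  apply PySem.List.foldl_congr_mem
  intro acc seq _
  apply PySem.List.foldl_congr_mem
  intro ut tok _
  simp only [PySem.Set.add]
  split_ifs with h1 h2 h2 <;> simp_all

lemma pvCollect_append (qs : List (String × String)) (a b : String) (t : String) :
    pvCollect (qs ++ [(a, b)]) t =
      if a = t then (if b ∉ pvCollect qs t then pvCollect qs t ++ [b] else pvCollect qs t)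
      else pvCollect qs t := by
  simp [pvCollect, List.foldl_append]

lemma pvCollect_not_mem (qs : List (String × String)) (a : String)
    (h : a ∉ qs.map Prod.fst) : pvCollect qs a = [] := by
  unfold pvCollect
  suffices H : ∀ acc, qs.foldl
      (fun acc p => if p.1 = a then (if p.2 ∉ acc then acc ++ [p.2] else acc) else acc) acc = acc from
    H []
  induction qs with
  | nil => intro acc; rfl
  | cons q qs ih =>
    intro acc
    have hq : q.1 ≠ a := fun he => h (by simp [← he])
    simp only [List.foldl_cons, if_neg hq]
    exact ih (fun hm => h (List.mem_cons_of_mem _ hm)) acc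

lemma pvDedup_append_singleton {α : Type} [BEq α] [LawfulBEq α] (xs : List α) (a : α) :
    PySem.List.dedup (xs ++ [a]) =
      if a ∈ xs then PySem.List.dedup xs else PySem.List.dedup xs ++ [a] := by
  rw [PySem.List.dedup, PySem.Set.ofList, List.foldl_append]
  simp only [List.foldl_cons, List.foldl_nil, PySem.Set.add]
  rw [← PySem.Set.ofList, ← PySem.List.dedup]
  by_cases h : a ∈ xs
  · rw [if_pos h, if_pos (by simp [h])]
  · rw [if_neg h, if_neg (by simp [h])]

lemma pvModel_keys (qs : List (String × String)) :
    (pvModel qs).keys = PySem.List.dedup (qs.map Prod.fst) := by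
  simp [pvModel, PySem.Dict.keys, Function.comp_def]

lemma pvModel_get? (qs : List (String × String)) (a : String) :
    (pvModel qs).get? a =
      if a ∈ qs.map Prod.fst then some (pvCollect qs a) else none := by
  by_cases h : a ∈ qs.map Prod.fst
  · rw [if_pos h]
    apply PySem.Dict.get?_of_mem_items
    · exact List.mem_map_of_mem ((PySem.List.mem_dedup _ _).mpr h)
    · rw [pvModel_keys]; exact PySem.List.nodup_dedup _
  · rw [if_neg h]
    rw [PySem.Dict.get?_eq_none_iff_not_mem_keys, pvModel_keys, PySem.List.mem_dedup]
    exact h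

lemma pvModel_contains (qs : List (String × String)) (a : String) :
    (pvModel qs).contains a = decide (a ∈ qs.map Prod.fst) := by
  rw [PySem.Dict.contains_eq_isSome_get?, pvModel_get?]
  by_cases h : a ∈ qs.map Prod.fst <;> simp [h]

lemma pvBStep_model (qs : List (String × String)) (a b : String) :
    pvBStep (pvModel qs) (a, b) = pvModel (qs ++ [(a, b)]) := by
  have hnd : (pvModel qs).keys.Nodup := by rw [pvModel_keys]; exact PySem.List.nodup_dedup _
  simp only [pvBStep]
  by_cases h : a ∈ qs.map Prod.fst
  · rw [PySem.Dict.setdefault_of_contains _ _ (by simp [pvModel_contains, h])]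
    have hget : (pvModel qs).getD a [] = pvCollect qs a := by
      rw [PySem.Dict.getD_eq_get?_getD, pvModel_get?, if_pos h]; rfl
    rw [hget]
    by_cases hb : b ∈ pvCollect qs a
    · rw [if_neg (by simp [hb])]
      apply PySem.Dict.ext
      simp only [pvModel, List.map_append, List.map_cons, List.map_nil]
      rw [pvDedup_append_singleton, if_pos h]
      apply List.map_congr_left
      intro t _
      rw [pvCollect_append]
      split_ifs with h1 h2 <;> simp_all
    · rw [if_pos (by simp [hb])]
      apply PySem.Dict.ext
      rw [PySem.Dict.items_insert_of_contains _ _ (by simp [pvModel_contains, h])]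
      simp only [pvModel, List.map_append, List.map_cons, List.map_nil, List.map_map]
      rw [pvDedup_append_singleton, if_pos h]
      apply List.map_congr_left
      intro t _
      simp only [Function.comp_apply, beq_iff_eq]
      by_cases hta : t = a
      · subst hta
        rw [if_pos rfl, pvCollect_append, if_pos rfl, if_pos (by simp [hb])]
      · rw [if_neg hta, pvCollect_append, if_neg (fun he => hta he.symm)]
  · have hcon : (pvModel qs).contains a = false := by simp [pvModel_contains, h]
    rw [PySem.Dict.setdefault_of_not_contains _ _ hcon]
    have hget : (((pvModel qs).insert a []).getD a ([] : List String)) = [] := by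
      rw [PySem.Dict.getD_eq_get?_getD, PySem.Dict.get?_insert_self]; rfl
    rw [hget, if_pos (by simp), List.nil_append, PySem.Dict.insert_insert_self]
    apply PySem.Dict.ext
    rw [PySem.Dict.items_insert_of_not_contains _ _ hcon]
    simp only [pvModel, List.map_append, List.map_cons, List.map_nil]
    rw [pvDedup_append_singleton, if_neg h]
    rw [List.map_append]
    congr 1
    · apply List.map_congr_left
      intro t ht
      have hta : a ≠ t := fun he => h (by
        subst he; exact (PySem.List.mem_dedup _ _).mp ht)
      rw [pvCollect_append, if_neg hta]
    · simp [pvCollect_append, pvCollect_not_mem qs a h]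

lemma pvModel_nil : pvModel [] = (PySem.Dict.empty : PySem.Dict String (List String)) := by
  apply PySem.Dict.ext
  simp [pvModel, PySem.List.dedup, PySem.Set.ofList, PySem.Set.empty, PySem.Dict.empty]

lemma pvFoldl_bstep (ps : List (String × String)) :
    ∀ qs, ps.foldl pvBStep (pvModel qs) = pvModel (qs ++ ps) := by
  induction ps with
  | nil => intro qs; simp
  | cons p ps ih =>
    intro qs
    obtain ⟨a, b⟩ := p
    simp only [List.foldl_cons]
    rw [pvBStep_model, ih (qs ++ [(a, b)])]
    simp

lemma pvPortA_eq (sequences : List (List String)) :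
    get_all_possible_next_tokens sequences = (pvModel (pvPairs sequences)).items := by
  unfold get_all_possible_next_tokens
  rw [pvUnique_eq]
  have H := PySem.Dict.items_foldl_insert_fresh
      (PySem.List.dedup ((pvPairs sequences).map Prod.fst)) (fun t => t)
      (fun t => pvFindAllNextToken sequences t)
      (PySem.Dict.empty : PySem.Dict String (List String))
      (fun t _ => PySem.Dict.contains_empty t)
      (by simp)
  simp only at H
  rw [H]
  simp only [pvModel, PySem.Dict.empty]
  rw [List.nil_append]
  exact List.map_congr_left (fun t _ => by rw [pvFindAll_eq])

lemma pvPortB_eq (sequences : List (List String)) :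
    get_all_possible_next_tokens_alt sequences = (pvModel (pvPairs sequences)).items := by
  unfold get_all_possible_next_tokens_alt
  have : sequences.foldl (fun d seq => (pvRotPairs seq).foldl pvBStep d)
      (PySem.Dict.empty : PySem.Dict String (List String)) =
      (pvPairs sequences).foldl pvBStep PySem.Dict.empty := by
    rw [pvPairs, List.flatMap_def, List.foldl_flatten, List.foldl_map]
  rw [this, ← pvModel_nil, pvFoldl_bstep]
  simp

-- ===== VERDICT (by name: the statement is the Claim_ definition above) =====
theorem get_all_possible_next_tokens_spec : Claim_equal_get_all_possible_next_tokens := by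
  intro sequences _
  unfold Spec_get_all_possible_next_tokens
  rw [pvPortA_eq, pvPortB_eq]
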